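-- pv_equiv track=rewrite | github.com/XinliYu/utix | _util/general_ext.py | count_and_rank
-- ===== SOURCE A (Python) =====
-- def count_and_rank(it, min_rank=True, make_tuple=True):
--     d = {}
--     if min_rank:
--         for i, key in enumerate(it):
--             rec = d.get(key, None)
--             if rec:
--                 rec[0] += 1
--             else:
--                 d[key] = [1, i]
--     else:
--         for i, key in enumerate(it):
--             rec = d.get(key, None)
--             if rec:
--                 rec[0] += 1
--                 rec[1] = i
--             else:
--                 d[key] = [1, i]
--
--     if make_tuple:
--         for key in d:
--             d[key] = tuple(d[key])
--
--     return d
-- ===== SOURCE B (Python) =====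
-- def count_and_rank(it, min_rank=True, make_tuple=True):
--     items = list(enumerate(it))
--     counts = {}
--     for _, k in items:
--         counts[k] = counts.get(k, 0) + 1
--     if min_rank:
--         idx = {}
--         for i, k in items:
--             idx.setdefault(k, i)
--     else:
--         idx = {k: i for i, k in items}
--     mk = tuple if make_tuple else list
--     return {k: mk([counts[k], idx[k]]) for k in idx}
-- ===== Notes on version B (the rewrite author's own statement) =====
-- stated objective: alternative
-- what changed: A maintains one dict of mutable [count, index] records updated in place per element; B computes a count table and a first/last-index table in separate passes over a single materialized enumeration and joins them at the end.
import Mathlib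
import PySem

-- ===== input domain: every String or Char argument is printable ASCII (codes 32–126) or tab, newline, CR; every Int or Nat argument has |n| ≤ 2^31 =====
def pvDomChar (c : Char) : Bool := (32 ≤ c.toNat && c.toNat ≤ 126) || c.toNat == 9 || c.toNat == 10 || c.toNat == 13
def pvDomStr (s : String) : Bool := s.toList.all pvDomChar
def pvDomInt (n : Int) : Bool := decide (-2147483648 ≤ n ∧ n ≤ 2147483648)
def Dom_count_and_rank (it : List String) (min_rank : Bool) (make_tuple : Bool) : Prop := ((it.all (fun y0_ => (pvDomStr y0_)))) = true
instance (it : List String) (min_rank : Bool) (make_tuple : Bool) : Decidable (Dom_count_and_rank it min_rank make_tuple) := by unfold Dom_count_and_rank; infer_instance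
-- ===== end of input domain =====

-- B replaces A's single in-place-record loop by two independent tables (a count table and a
-- first/last-index table) joined at the end; objective: alternative decomposition, same cost.

-- ===== PORT A =====
-- one enumerate step of A's min_rank loop: existing key bumps the count, new key records [1, i]
def pvStepMin (d : PySem.Dict String (Int × Int)) (p : Int × String) : PySem.Dict String (Int × Int) :=
  match d.get? p.2 with
  | some rec => d.insert p.2 (rec.1 + 1, rec.2)
  | none => d.insert p.2 (1, p.1)

-- one enumerate step of A's not-min_rank loop: existing key bumps the count and updates the index
def pvStepMax (d : PySem.Dict String (Int × Int)) (p : Int × String) : PySem.Dict String (Int × Int) :=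
  match d.get? p.2 with
  | some rec => d.insert p.2 (rec.1 + 1, p.1)
  | none => d.insert p.2 (1, p.1)

-- 'd[key] = tuple(d[key])': tuple(list) is the identity on the (Int × Int) representation
def pvTupStep (d : PySem.Dict String (Int × Int)) (k : String) : PySem.Dict String (Int × Int) :=
  match d.get? k with
  | some v => d.insert k v
  | none => d  -- unreachable: key comes from d.keys (totality guard)

def count_and_rank (it : List String) (min_rank : Bool) (make_tuple : Bool) : List (String × Int × Int) :=
  let d : PySem.Dict String (Int × Int) :=
    if min_rank then (PySem.List.enumerate it).foldl pvStepMin PySem.Dict.empty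
    else (PySem.List.enumerate it).foldl pvStepMax PySem.Dict.empty
  let d2 := if make_tuple then d.keys.foldl pvTupStep d else d
  d2.items

-- ===== PORT B =====
-- counts[k] = counts.get(k, 0) + 1
def pvCStep (c : PySem.Dict String Int) (p : Int × String) : PySem.Dict String Int :=
  c.insert p.2 (c.getD p.2 0 + 1)

-- idx.setdefault(k, i)  (keeps the first index)
def pvJMinStep (j : PySem.Dict String Int) (p : Int × String) : PySem.Dict String Int :=
  j.setdefault p.2 p.1

-- idx[k] = i  (dict comprehension: keeps the last index, first-appearance position)
def pvJMaxStep (j : PySem.Dict String Int) (p : Int × String) : PySem.Dict String Int :=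
  j.insert p.2 p.1

-- make_tuple picks tuple vs list in Python; both are the pair (Int × Int) here, so it is unused
def count_and_rank_alt (it : List String) (min_rank : Bool) (make_tuple : Bool) : List (String × Int × Int) :=
  let items := PySem.List.enumerate it
  let counts := items.foldl pvCStep PySem.Dict.empty
  let idx := if min_rank then items.foldl pvJMinStep PySem.Dict.empty
             else items.foldl pvJMaxStep PySem.Dict.empty
  idx.items.map (fun p => (p.1, counts.getD p.1 0, p.2))

-- ===== PRECONDITION & SPEC =====
def Spec_count_and_rank (it : List String) (min_rank : Bool) (make_tuple : Bool) (out : List (String × Int × Int)) : Prop := out = count_and_rank_alt it min_rank make_tuple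
instance (it : List String) (min_rank : Bool) (make_tuple : Bool) (out : List (String × Int × Int)) : Decidable (Spec_count_and_rank it min_rank make_tuple out) := by unfold Spec_count_and_rank; infer_instance

-- ===== CLAIM (what is proved, stated in full; the proofs are below) =====
def Claim_equal_count_and_rank : Prop := ∀ (it : List String) (min_rank : Bool) (make_tuple : Bool), Dom_count_and_rank it min_rank make_tuple → Spec_count_and_rank it min_rank make_tuple (count_and_rank it min_rank make_tuple)

-- ===== LEMMAS AND PROOFS =====

-- value-map on a dict (keys and order untouched)
def pvMapVal {ν β : Type} (f : ν → β) (d : PySem.Dict String ν) : PySem.Dict String β :=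
  PySem.Dict.mk (d.items.map (fun p => (p.1, f p.2)))

theorem pvMapVal_items {ν β : Type} (f : ν → β) (d : PySem.Dict String ν) :
    (pvMapVal f d).items = d.items.map (fun p => (p.1, f p.2)) := rfl

theorem pvMapVal_keys {ν β : Type} (f : ν → β) (d : PySem.Dict String ν) :
    (pvMapVal f d).keys = d.keys := by
  show (pvMapVal f d).items.map (·.1) = d.items.map (·.1)
  rw [pvMapVal_items, List.map_map]; rfl

theorem pvMapVal_get? {ν β : Type} (f : ν → β) (d : PySem.Dict String ν) (k : String) :
    (pvMapVal f d).get? k = (d.get? k).map f := by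
  obtain ⟨l⟩ := d
  induction l with
  | nil => rfl
  | cons p l ih =>
    simp only [pvMapVal, List.map_cons] at ih ⊢
    rw [PySem.Dict.get?_mk_cons, PySem.Dict.get?_mk_cons]
    by_cases h : (p.1 == k) = true
    · simp [h]
    · simp only [h, if_false, Bool.false_eq_true]
      exact ih

theorem pvMapVal_contains {ν β : Type} (f : ν → β) (d : PySem.Dict String ν) (k : String) :
    (pvMapVal f d).contains k = d.contains k := by
  rw [PySem.Dict.contains_eq_isSome_get?, PySem.Dict.contains_eq_isSome_get?, pvMapVal_get?]
  cases d.get? k <;> rfl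

theorem pvMapVal_insert {ν β : Type} (f : ν → β) (d : PySem.Dict String ν) (k : String) (v : ν) :
    pvMapVal f (d.insert k v) = (pvMapVal f d).insert k (f v) := by
  apply PySem.Dict.ext
  rw [pvMapVal_items, PySem.Dict.items_insert, PySem.Dict.items_insert, pvMapVal_contains,
    pvMapVal_items]
  by_cases h : d.contains k = true
  · simp only [h, if_true, List.map_map]
    apply List.map_congr_left
    intro p _
    by_cases hp : p.1 = k <;> simp [hp]
  · simp [h]

theorem pvInsert_get_self {ν : Type} (d : PySem.Dict String ν) (k : String) (v : ν)
    (hnd : d.keys.Nodup) (h : d.get? k = some v) : d.insert k v = d := by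
  apply PySem.Dict.ext
  have hc : d.contains k = true := by
    rw [PySem.Dict.contains_eq_isSome_get?, h]; rfl
  rw [PySem.Dict.items_insert_of_contains d v hc]
  conv_rhs => rw [← List.map_id d.items]
  apply List.map_congr_left
  intro p hp
  obtain ⟨p1, p2⟩ := p
  by_cases hpk : (p1 == k) = true
  · have hk : p1 = k := by simpa using hpk
    subst hk
    have hg := PySem.Dict.get?_of_mem_items d hp hnd
    rw [h] at hg
    injection hg with hv
    simp [hv]
  · simp [hpk]

-- keys stay unique through A's loops
theorem pvNodup_stepMin (d : PySem.Dict String (Int × Int)) (p : Int × String)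
    (h : d.keys.Nodup) : (pvStepMin d p).keys.Nodup := by
  unfold pvStepMin; split <;> exact PySem.Dict.nodup_keys_insert _ _ _ h

theorem pvNodup_stepMax (d : PySem.Dict String (Int × Int)) (p : Int × String)
    (h : d.keys.Nodup) : (pvStepMax d p).keys.Nodup := by
  unfold pvStepMax; split <;> exact PySem.Dict.nodup_keys_insert _ _ _ h

theorem pvNodup_foldMin (l : List (Int × String)) (d : PySem.Dict String (Int × Int))
    (h : d.keys.Nodup) : (l.foldl pvStepMin d).keys.Nodup := by
  induction l generalizing d with
  | nil => exact h
  | cons p l ih => exact ih _ (pvNodup_stepMin d p h)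

theorem pvNodup_foldMax (l : List (Int × String)) (d : PySem.Dict String (Int × Int))
    (h : d.keys.Nodup) : (l.foldl pvStepMax d).keys.Nodup := by
  induction l generalizing d with
  | nil => exact h
  | cons p l ih => exact ih _ (pvNodup_stepMax d p h)

-- the count projection of A's step IS B's count step
theorem pvToC_stepMin (d : PySem.Dict String (Int × Int)) (p : Int × String) :
    pvMapVal (·.1) (pvStepMin d p) = pvCStep (pvMapVal (·.1) d) p := by
  unfold pvStepMin pvCStep
  cases h : d.get? p.2 with
  | none =>
    have hg : (pvMapVal (·.1) d).get? p.2 = none := by rw [pvMapVal_get?, h]; rfl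
    rw [pvMapVal_insert, PySem.Dict.getD_of_get?_eq_none _ 0 hg]; norm_num
  | some r =>
    have hg : (pvMapVal (·.1) d).get? p.2 = some r.1 := by rw [pvMapVal_get?, h]; rfl
    rw [pvMapVal_insert, PySem.Dict.getD_of_get?_eq_some _ 0 hg]

theorem pvToC_stepMax (d : PySem.Dict String (Int × Int)) (p : Int × String) :
    pvMapVal (·.1) (pvStepMax d p) = pvCStep (pvMapVal (·.1) d) p := by
  unfold pvStepMax pvCStep
  cases h : d.get? p.2 with
  | none =>
    have hg : (pvMapVal (·.1) d).get? p.2 = none := by rw [pvMapVal_get?, h]; rfl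
    rw [pvMapVal_insert, PySem.Dict.getD_of_get?_eq_none _ 0 hg]; norm_num
  | some r =>
    have hg : (pvMapVal (·.1) d).get? p.2 = some r.1 := by rw [pvMapVal_get?, h]; rfl
    rw [pvMapVal_insert, PySem.Dict.getD_of_get?_eq_some _ 0 hg]

-- the index projection of A's step IS B's index step
theorem pvToJ_stepMin (d : PySem.Dict String (Int × Int)) (p : Int × String)
    (hnd : d.keys.Nodup) :
    pvMapVal (·.2) (pvStepMin d p) = pvJMinStep (pvMapVal (·.2) d) p := by
  unfold pvStepMin pvJMinStep
  cases h : d.get? p.2 with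
  | none =>
    have hg : (pvMapVal (·.2) d).contains p.2 = false := by
      rw [PySem.Dict.contains_eq_isSome_get?, pvMapVal_get?, h]; rfl
    rw [pvMapVal_insert, PySem.Dict.setdefault_of_not_contains _ _ hg]
  | some r =>
    have hg : (pvMapVal (·.2) d).contains p.2 = true := by
      rw [PySem.Dict.contains_eq_isSome_get?, pvMapVal_get?, h]; rfl
    rw [pvMapVal_insert, PySem.Dict.setdefault_of_contains _ _ hg]
    exact pvInsert_get_self _ _ _ (by rw [pvMapVal_keys]; exact hnd)
      (by rw [pvMapVal_get?, h]; rfl)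

theorem pvToJ_stepMax (d : PySem.Dict String (Int × Int)) (p : Int × String) :
    pvMapVal (·.2) (pvStepMax d p) = pvJMaxStep (pvMapVal (·.2) d) p := by
  unfold pvStepMax pvJMaxStep
  cases h : d.get? p.2 <;> rw [pvMapVal_insert]

-- main invariant: A's dict is the index table decorated with the (full-fold) counts
theorem pvMain_min (l : List (Int × String)) (d : PySem.Dict String (Int × Int))
    (hnd : d.keys.Nodup) :
    (l.foldl pvStepMin d).items =
      (l.foldl pvJMinStep (pvMapVal (·.2) d)).items.map
        (fun p => (p.1, (l.foldl pvCStep (pvMapVal (·.1) d)).getD p.1 0, p.2)) := by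
  induction l generalizing d with
  | nil =>
    simp only [List.foldl_nil]
    rw [pvMapVal_items, List.map_map]
    conv_lhs => rw [← List.map_id d.items]
    apply List.map_congr_left
    intro p hp
    obtain ⟨p1, p2, p3⟩ := p
    have hm : (p1, p2) ∈ (pvMapVal (·.1) d).items := by
      rw [pvMapVal_items]
      exact List.mem_map.mpr ⟨(p1, (p2, p3)), hp, rfl⟩
    have hg := PySem.Dict.getD_of_mem_items _ hm (by rw [pvMapVal_keys]; exact hnd) 0
    simp [hg]
  | cons p l ih =>
    simp only [List.foldl_cons]
    rw [ih _ (pvNodup_stepMin d p hnd), pvToC_stepMin, pvToJ_stepMin d p hnd]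

theorem pvMain_max (l : List (Int × String)) (d : PySem.Dict String (Int × Int))
    (hnd : d.keys.Nodup) :
    (l.foldl pvStepMax d).items =
      (l.foldl pvJMaxStep (pvMapVal (·.2) d)).items.map
        (fun p => (p.1, (l.foldl pvCStep (pvMapVal (·.1) d)).getD p.1 0, p.2)) := by
  induction l generalizing d with
  | nil =>
    simp only [List.foldl_nil]
    rw [pvMapVal_items, List.map_map]
    conv_lhs => rw [← List.map_id d.items]
    apply List.map_congr_left
    intro p hp
    obtain ⟨p1, p2, p3⟩ := p
    have hm : (p1, p2) ∈ (pvMapVal (·.1) d).items := by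
      rw [pvMapVal_items]
      exact List.mem_map.mpr ⟨(p1, (p2, p3)), hp, rfl⟩
    have hg := PySem.Dict.getD_of_mem_items _ hm (by rw [pvMapVal_keys]; exact hnd) 0
    simp [hg]
  | cons p l ih =>
    simp only [List.foldl_cons]
    rw [ih _ (pvNodup_stepMax d p hnd), pvToC_stepMax, pvToJ_stepMax]

-- the tuple-ification loop is the identity on the Lean representation
theorem pvTup_id (ks : List String) (d : PySem.Dict String (Int × Int))
    (hnd : d.keys.Nodup) : ks.foldl pvTupStep d = d := by
  induction ks with
  | nil => rfl
  | cons k ks ih =>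
    have hstep : pvTupStep d k = d := by
      unfold pvTupStep
      cases h : d.get? k with
      | none => rfl
      | some v => exact pvInsert_get_self d k v hnd h
    rw [List.foldl_cons, hstep, ih]

theorem pvEmptyC : pvMapVal (·.1) (PySem.Dict.empty : PySem.Dict String (Int × Int)) = PySem.Dict.empty := rfl
theorem pvEmptyJ : pvMapVal (·.2) (PySem.Dict.empty : PySem.Dict String (Int × Int)) = PySem.Dict.empty := rfl

-- ===== VERDICT (by name: the statement is the Claim_ definition above) =====
theorem count_and_rank_spec : Claim_equal_count_and_rank := by
  intro it min_rank make_tuple _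
  unfold Spec_count_and_rank count_and_rank count_and_rank_alt
  have hnd : (PySem.Dict.empty : PySem.Dict String (Int × Int)).keys.Nodup :=
    PySem.Dict.nodup_keys_empty
  cases min_rank with
  | false =>
    simp only [Bool.false_eq_true, if_false]
    cases make_tuple with
    | false =>
      simp only [Bool.false_eq_true, if_false]
      rw [pvMain_max _ _ hnd, pvEmptyC, pvEmptyJ]
    | true =>
      simp only [if_true]
      rw [pvTup_id _ _ (pvNodup_foldMax _ _ hnd), pvMain_max _ _ hnd, pvEmptyC, pvEmptyJ]
  | true =>
    simp only [if_true]
    cases make_tuple with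
    | false =>
      simp only [Bool.false_eq_true, if_false]
      rw [pvMain_min _ _ hnd, pvEmptyC, pvEmptyJ]
    | true =>
      simp only [if_true]
      rw [pvTup_id _ _ (pvNodup_foldMin _ _ hnd), pvMain_min _ _ hnd, pvEmptyC, pvEmptyJ]
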